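-- pv_equiv track=rewrite | github.com/WeronikaBiela0031/Zadania-Python | Biela4.py | odwracanie_listy_rek
-- ===== SOURCE A (Python) =====
-- def odwracanie_listy_rek(L, left, right):
--     # nie wiem jak rozumieć rekurencje- poprez ustalanie ze ostatni wyraz innej listy to kolejny nowej?
--     j = 0
--     n = L.index(left)
--     m = L.index(right)
--     L2 = L[n:m + 1]  # wycinam co chce obrócić, mogłabym nie tworzyć L1 ale to nie robi różnicy
--     L22 = []  # pusta lista ktora bedzie tworzona
--     while len(L2) > 0:
--         L22.append(L2.pop())
--         j += 1
--     L3 = L[:n] + L22 + L[m + 1:]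
--     return L3
-- ===== SOURCE B (Python) =====
-- def odwracanie_listy_rek(L, left, right):
--     Lc = L[:]
--     i = L.index(left)
--     j = L.index(right)
--     while i < j:
--         Lc[i], Lc[j] = Lc[j], Lc[i]
--         i += 1
--         j -= 1
--     return Lc
-- ===== Notes on version B (the rewrite author's own statement) =====
-- stated objective: simpler
-- what changed: Replaces slice-extraction plus a destructive pop-and-append rebuild loop and three-way concatenation by an in-place two-pointer swap on a single copy of the list.
-- intended difference: On inputs where left's first index n exceeds right's first index m by more than 1, A returns L[:n]+L[m+1:] (elements between m+1 and n-1 duplicated, a slicing artefact), while B returns the list unchanged, the intended no-op for an empty reversal range. — e.g. on odwracanie_listy_rek([1, 2, 3], 3, 1): A returns [1, 2, 2, 3], B returns [1, 2, 3]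
import Mathlib
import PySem

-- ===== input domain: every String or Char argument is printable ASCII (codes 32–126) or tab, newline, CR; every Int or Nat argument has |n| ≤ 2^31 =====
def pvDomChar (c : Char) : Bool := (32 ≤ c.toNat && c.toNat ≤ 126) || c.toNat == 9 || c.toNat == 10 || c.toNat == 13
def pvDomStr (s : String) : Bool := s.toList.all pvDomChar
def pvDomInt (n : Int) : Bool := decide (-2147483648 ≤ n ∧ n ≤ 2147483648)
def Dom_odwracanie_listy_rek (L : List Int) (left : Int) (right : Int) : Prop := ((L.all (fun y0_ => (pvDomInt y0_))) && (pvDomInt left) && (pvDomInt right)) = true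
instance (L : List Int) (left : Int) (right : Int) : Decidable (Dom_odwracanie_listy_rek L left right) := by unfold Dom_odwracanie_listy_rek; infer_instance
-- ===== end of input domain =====

-- B replaces A's slice-extraction + destructive pop-and-append rebuild + 3-way concatenation by a
-- two-pointer swap on a single copy; on the empty reversal range (left's index > right's index + 1)
-- A's slicing artefact duplicates elements while B returns the list unchanged (stated as D_ below).


-- ===== PORT A =====
-- 'while len(L2) > 0: L22.append(L2.pop()); j += 1' — pop() on a nonempty list is exactly
-- (getLast, dropLast); j is A's (dead) loop counter, carried faithfully.
def pvPopLoopA (L2 L22 : List Int) (j : Int) : List Int :=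
  if h : 0 < L2.length then
    pvPopLoopA L2.dropLast (L22 ++ [L2.getLast (by intro hn; simp [hn] at h)]) (j + 1)
  else L22
termination_by L2.length
decreasing_by simpa using Nat.sub_lt h Nat.one_pos

def odwracanie_listy_rek (L : List Int) (left : Int) (right : Int) : List Int :=
  -- n = L.index(left); m = L.index(right): Pre_ guarantees membership, so index? is some
  let n : Nat := (PySem.List.index? L left).getD 0
  let m : Nat := (PySem.List.index? L right).getD 0
  let L2 := PySem.List.slice L (some (n : Int)) (some ((m : Int) + 1))
  let L22 := pvPopLoopA L2 [] 0
  PySem.List.slice L none (some (n : Int)) ++ L22 ++ PySem.List.slice L (some ((m : Int) + 1)) none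

-- ===== PORT B =====
-- 'while i < j: Lc[i], Lc[j] = Lc[j], Lc[i]; i += 1; j -= 1' — both reads happen before both
-- writes; Lc[i]/Lc[j] are in range whenever the loop is entered under Pre_, so List.getD is exact.
def pvSwapLoopB (Lc : List Int) (i j : Nat) : List Int :=
  if i < j then
    pvSwapLoopB ((Lc.set i (Lc.getD j 0)).set j (Lc.getD i 0)) (i + 1) (j - 1)
  else Lc
termination_by j - i

def odwracanie_listy_rek_alt (L : List Int) (left : Int) (right : Int) : List Int :=
  -- Lc = L[:]; i = L.index(left); j = L.index(right)
  let i : Nat := (PySem.List.index? L left).getD 0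
  let j : Nat := (PySem.List.index? L right).getD 0
  pvSwapLoopB L i j

-- ===== PRECONDITION & SPEC =====
-- Pre_ excludes exactly the inputs where Python's L.index raises ValueError.
def Pre_odwracanie_listy_rek (L : List Int) (left : Int) (right : Int) : Prop :=
  left ∈ L ∧ right ∈ L
instance (L : List Int) (left : Int) (right : Int) : Decidable (Pre_odwracanie_listy_rek L left right) := by unfold Pre_odwracanie_listy_rek; infer_instance
def pvWitness_odwracanie_listy_rek : List Int × Int × Int := ([1, 2, 3], 1, 3)

-- On inputs where left's first index exceeds right's first index by more than 1, A returns
-- L[:n] + L[m+1:] (the elements at positions m+1..n-1 appear twice, a slicing artefact),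
-- while B returns the list unchanged — the intended no-op for an empty reversal range.
def D_odwracanie_listy_rek (L : List Int) (left : Int) (right : Int) : Prop :=
  L.idxOf right + 1 < L.idxOf left
instance (L : List Int) (left : Int) (right : Int) : Decidable (D_odwracanie_listy_rek L left right) := by unfold D_odwracanie_listy_rek; infer_instance

def Spec_odwracanie_listy_rek (L : List Int) (left : Int) (right : Int) (out : List Int) : Prop := ¬ D_odwracanie_listy_rek L left right → out = odwracanie_listy_rek_alt L left right
instance (L : List Int) (left : Int) (right : Int) (out : List Int) : Decidable (Spec_odwracanie_listy_rek L left right out) := by unfold Spec_odwracanie_listy_rek; infer_instance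

def pvDiffWitness_odwracanie_listy_rek : List Int × Int × Int := ([1, 2, 3], 3, 1)
def pvDiffWitnessOut_odwracanie_listy_rek : (List Int) × (List Int) := ([1, 2, 2, 3], [1, 2, 3])

-- ===== CLAIM =====
def Claim_unchanged_odwracanie_listy_rek : Prop := ∀ (L : List Int) (left : Int) (right : Int), Dom_odwracanie_listy_rek L left right → Pre_odwracanie_listy_rek L left right → Spec_odwracanie_listy_rek L left right (odwracanie_listy_rek L left right)
def Claim_changed_odwracanie_listy_rek : Prop := Dom_odwracanie_listy_rek (pvDiffWitness_odwracanie_listy_rek.1) (pvDiffWitness_odwracanie_listy_rek.2.1) (pvDiffWitness_odwracanie_listy_rek.2.2) ∧ Pre_odwracanie_listy_rek (pvDiffWitness_odwracanie_listy_rek.1) (pvDiffWitness_odwracanie_listy_rek.2.1) (pvDiffWitness_odwracanie_listy_rek.2.2) ∧ D_odwracanie_listy_rek (pvDiffWitness_odwracanie_listy_rek.1) (pvDiffWitness_odwracanie_listy_rek.2.1) (pvDiffWitness_odwracanie_listy_rek.2.2) ∧ odwracanie_listy_rek (pvDiffWitness_odwracanie_listy_rek.1) (pvDiffWitness_odwracanie_listy_rek.2.1)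 (pvDiffWitness_odwracanie_listy_rek.2.2) = pvDiffWitnessOut_odwracanie_listy_rek.1 ∧ odwracanie_listy_rek_alt (pvDiffWitness_odwracanie_listy_rek.1) (pvDiffWitness_odwracanie_listy_rek.2.1) (pvDiffWitness_odwracanie_listy_rek.2.2) = pvDiffWitnessOut_odwracanie_listy_rek.2 ∧ pvDiffWitnessOut_odwracanie_listy_rek.1 ≠ pvDiffWitnessOut_odwracanie_listy_rek.2
def Claim_exact_odwracanie_listy_rek : Prop := ∀ (L : List Int) (left : Int) (right : Int), Dom_odwracanie_listy_rek L left right → Pre_odwracanie_listy_rek L left right → D_odwracanie_listy_rek L left right → odwracanie_listy_rek L left right ≠ odwracanie_listy_rek_alt L left right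

-- ===== LEMMAS AND PROOFS =====

-- Python L.index(v) for a member v is the first index of v.
lemma index?_of_mem (v : Int) : ∀ (L : List Int), v ∈ L → PySem.List.index? L v = some (L.idxOf v) := by
  intro L hv
  induction L with
  | nil => cases hv
  | cons x xs ih =>
      by_cases hx : x = v
      · subst hx
        rw [PySem.List.index?_cons_self, List.idxOf_cons_self]
      · rcases List.mem_cons.mp hv with h | h
        · exact absurd h.symm hx
        · rw [PySem.List.index?_cons_of_ne xs hx, ih h]
          simp [hx]

-- A's pop loop builds the reverse of L2 onto L22.
lemma pvPopLoopA_eq (L2 : List Int) : ∀ (L22 : List Int) (j : Int), pvPopLoopA L2 L22 j = L22 ++ L2.reverse := by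
  induction L2 using List.reverseRecOn with
  | nil => intro L22 j; rw [pvPopLoopA]; simp
  | append_singleton xs x ih =>
      intro L22 j
      rw [pvPopLoopA]
      simp [ih]

lemma pvSwapLoopB_stop (L : List Int) (i j : Nat) (h : ¬ i < j) : pvSwapLoopB L i j = L := by
  rw [pvSwapLoopB, if_neg h]

-- The swap loop preserves length.
lemma pvSwapLoopB_length (d : Nat) : ∀ (L : List Int) (i j : Nat), j - i ≤ d →
    (pvSwapLoopB L i j).length = L.length := by
  induction d with
  | zero =>
      intro L i j h
      rw [pvSwapLoopB, if_neg (by omega)]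
  | succ d ih =>
      intro L i j h
      rw [pvSwapLoopB]
      split
      · rw [ih _ _ _ (by omega)]; simp
      · rfl

-- Element characterisation of the swap loop: indices in [i, j] are mirrored.
lemma pvSwapLoopB_getD (d : Nat) : ∀ (L : List Int) (i j k : Nat), j - i ≤ d → j < L.length →
    (pvSwapLoopB L i j).getD k 0 =
      if i ≤ k ∧ k ≤ j then L.getD (i + j - k) 0 else L.getD k 0 := by
  induction d with
  | zero =>
      intro L i j k h hj
      rw [pvSwapLoopB, if_neg (by omega)]
      split
      · next hk =>
          have : i + j - k = k := by omega
          rw [this]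
      · rfl
  | succ d ih =>
      intro L i j k h hj
      rw [pvSwapLoopB]
      split
      · next hij =>
          rw [ih _ _ _ _ (by omega) (by simp; omega)]
          have hset : ∀ t : Nat, ((L.set i (L.getD j 0)).set j (L.getD i 0)).getD t 0 =
              if t = j then L.getD i 0 else if t = i then L.getD j 0 else L.getD t 0 := by
            intro t
            simp only [List.getD_eq_getElem?_getD, List.getElem?_set, List.length_set]
            split_ifs <;> first | rfl | omega
          simp only [hset]
          split_ifs <;> first | rfl | omega | (congr 1; omega)
      · next hij =>
          split
          · next hk =>
              have : i + j - k = k := by omega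
              rw [this]
          · rfl

-- A's result written as take / reversed segment / drop.
lemma A_form (L : List Int) (left right : Int) (hl : left ∈ L) (hr : right ∈ L) :
    odwracanie_listy_rek L left right =
      L.take (L.idxOf left)
        ++ ((L.drop (L.idxOf left)).take (L.idxOf right + 1 - L.idxOf left)).reverse
        ++ L.drop (L.idxOf right + 1) := by
  have hc : ((L.idxOf right : Int) + 1) = ((L.idxOf right + 1 : Nat) : Int) := by push_cast; ring
  simp only [odwracanie_listy_rek, index?_of_mem left L hl, index?_of_mem right L hr,
    Option.getD_some, hc, PySem.List.slice_to_natCast, PySem.List.slice_from_natCast,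
    PySem.List.slice_natCast, pvPopLoopA_eq, List.nil_append]

lemma B_form (L : List Int) (left right : Int) (hl : left ∈ L) (hr : right ∈ L) :
    odwracanie_listy_rek_alt L left right = pvSwapLoopB L (L.idxOf left) (L.idxOf right) := by
  simp only [odwracanie_listy_rek_alt, index?_of_mem left L hl, index?_of_mem right L hr,
    Option.getD_some]

-- Element characterisation of A's take/reverse/drop concatenation (n ≤ m < |L|).
lemma concat3_getD (L : List Int) (n m k : Nat) (hn : n < L.length) (hm : m < L.length)
    (hnm : n ≤ m) :
    (L.take n ++ ((L.drop n).take (m + 1 - n)).reverse ++ L.drop (m + 1)).getD k 0 =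
      if n ≤ k ∧ k ≤ m then L.getD (n + m - k) 0 else L.getD k 0 := by
  have hlt : (L.take n).length = n := by simp; omega
  have hseglen : ((L.drop n).take (m + 1 - n)).length = m + 1 - n := by simp; omega
  have hTR : (L.take n ++ ((L.drop n).take (m + 1 - n)).reverse).length = m + 1 := by
    rw [List.length_append, hlt, List.length_reverse, hseglen]; omega
  rcases Nat.lt_or_ge k n with h1 | h1
  · rw [List.getD_eq_getElem?_getD,
      List.getElem?_append_left (by rw [hTR]; omega),
      List.getElem?_append_left (by rw [hlt]; omega),
      List.getElem?_take_of_lt h1,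
      if_neg (by omega), List.getD_eq_getElem?_getD]
  · by_cases h2 : k ≤ m
    · rw [List.getD_eq_getElem?_getD,
        List.getElem?_append_left (by rw [hTR]; omega),
        List.getElem?_append_right (by rw [hlt]; omega),
        hlt,
        List.getElem?_reverse (by rw [hseglen]; omega),
        hseglen,
        List.getElem?_take, if_pos (by omega),
        List.getElem?_drop,
        show n + (m + 1 - n - 1 - (k - n)) = n + m - k by omega,
        if_pos ⟨h1, h2⟩, List.getD_eq_getElem?_getD]
    · rw [List.getD_eq_getElem?_getD,
        List.getElem?_append_right (by rw [hTR]; omega),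
        hTR,
        List.getElem?_drop,
        show m + 1 + (k - (m + 1)) = k by omega,
        if_neg (by omega), List.getD_eq_getElem?_getD]

lemma main_eq (L : List Int) (left right : Int) (hl : left ∈ L) (hr : right ∈ L)
    (hnD : ¬ D_odwracanie_listy_rek L left right) :
    odwracanie_listy_rek L left right = odwracanie_listy_rek_alt L left right := by
  unfold D_odwracanie_listy_rek at hnD
  have hn : L.idxOf left < L.length := List.idxOf_lt_length_of_mem hl
  have hm : L.idxOf right < L.length := List.idxOf_lt_length_of_mem hr
  rw [A_form L left right hl hr, B_form L left right hl hr]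
  set n := L.idxOf left with hndef
  set m := L.idxOf right with hmdef
  by_cases hcase : n = m + 1
  · rw [hcase, Nat.sub_self, List.take_zero, List.reverse_nil, List.append_nil,
      List.take_append_drop, pvSwapLoopB_stop L (m + 1) m (by omega)]
  · have hle : n ≤ m := by omega
    apply List.ext_getElem
    · rw [pvSwapLoopB_length (m - n) L n m (by omega)]
      simp
      omega
    · intro k hk1 hk2
      rw [← List.getD_eq_getElem _ 0 hk1, ← List.getD_eq_getElem _ 0 hk2,
        pvSwapLoopB_getD (m - n) L n m k (by omega) hm,
        concat3_getD L n m k hn hm hle]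

-- ===== VERDICT =====
theorem odwracanie_listy_rek_spec : Claim_unchanged_odwracanie_listy_rek := by
  intro L left right _ hPre hnD
  exact main_eq L left right hPre.1 hPre.2 hnD

theorem odwracanie_listy_rek_changed : Claim_changed_odwracanie_listy_rek := by
  unfold Claim_changed_odwracanie_listy_rek
  refine ⟨by decide, by decide, by decide, ?_, ?_, by decide⟩
  · show odwracanie_listy_rek [1, 2, 3] 3 1 = [1, 2, 2, 3]
    rw [A_form _ _ _ (by decide) (by decide)]
    decide
  · show odwracanie_listy_rek_alt [1, 2, 3] 3 1 = [1, 2, 3]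
    rw [B_form _ _ _ (by decide) (by decide), pvSwapLoopB_stop _ _ _ (by decide)]

theorem odwracanie_listy_rek_tight : Claim_exact_odwracanie_listy_rek := by
  intro L left right _ hPre hD heq
  obtain ⟨hl, hr⟩ := hPre
  unfold D_odwracanie_listy_rek at hD
  have hn : L.idxOf left < L.length := List.idxOf_lt_length_of_mem hl
  have hm : L.idxOf right < L.length := List.idxOf_lt_length_of_mem hr
  rw [A_form L left right hl hr, B_form L left right hl hr] at heq
  have hlen := congrArg List.length heq
  rw [pvSwapLoopB_length 0 L _ _ (by omega)] at hlen
  simp at hlen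
  omega
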